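-- pv_equiv track=rewrite | github.com/ileadall42/Algorithm | Leetcode/Week3/leetcode_654.py | checkPossibility3
-- ===== SOURCE A (Python) =====
-- def checkPossibility3( nums):
--     """
--     :type nums: List[int]
--     :rtype: bool
--     """
--     one, two = nums[:], nums[:]
--     for i in range(len(nums) - 1):
--         if nums[i] > nums[i + 1]:
--             one[i] = nums[i + 1]
--             two[i + 1] = nums[i]
--             break
--     def valid(arr):
--         for i in range(len(arr) - 1):
--             if arr[i] > arr[i + 1]:
--                 return False
--         return True
--     return valid(one) or valid(two)
--
--     def checkPossibility(self, nums):
--         isND = lambda ns: all(map(operator.le, ns[:-1], ns[1:]))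
--         for i in range(1, len(nums)):
--             if nums[i - 1] > nums[i]:
--                 return isND(nums[:i - 1] + nums[i:]) or isND(nums[:i] + nums[i + 1:])
--         return True
-- ===== SOURCE B (Python) =====
-- def checkPossibility3(nums):
--     """
--     :type nums: List[int]
--     :rtype: bool
--     """
--     n = len(nums)
--     bad = [i for i in range(n - 1) if nums[i] > nums[i + 1]]
--     if not bad:
--         return True
--     if len(bad) == 1:
--         i = bad[0]
--         return (i == 0 or nums[i - 1] <= nums[i + 1]) or (i == n - 2 or nums[i] <= nums[i + 2])
--     return False
-- ===== Notes on version B (the rewrite author's own statement) =====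
-- stated objective: simpler
-- what changed: Instead of building two patched copies of the array and validating each with a full scan, B collects the violation indices in one pass and decides by a closed-form local condition at the unique violation (0 violations: True; 2+: False; 1 at i: i==0 or nums[i-1]<=nums[i+1], or i==n-2 or nums[i]<=nums[i+2]).
import Mathlib
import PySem

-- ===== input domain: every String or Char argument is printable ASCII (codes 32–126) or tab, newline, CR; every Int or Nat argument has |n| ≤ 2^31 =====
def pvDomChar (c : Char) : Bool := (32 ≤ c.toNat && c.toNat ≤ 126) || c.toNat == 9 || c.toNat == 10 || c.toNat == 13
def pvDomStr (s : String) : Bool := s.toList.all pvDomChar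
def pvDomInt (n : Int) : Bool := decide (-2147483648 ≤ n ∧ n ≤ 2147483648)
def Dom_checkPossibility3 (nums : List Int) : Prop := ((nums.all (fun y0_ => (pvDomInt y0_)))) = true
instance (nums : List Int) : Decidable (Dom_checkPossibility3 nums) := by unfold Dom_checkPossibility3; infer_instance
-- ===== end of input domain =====

-- B replaces A's two patched copies + two validation scans by one violation-index pass
-- and a closed-form local condition.  Note: A copies nums and never mutates the argument.
-- ===== PORT A =====
-- indices accessed by A's loops are always in range, so List.getD is exact here
def pvALoop (nums one two : List Int) (i : Nat) : List Int × List Int :=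
  if i < nums.length - 1 then
    if nums.getD i 0 > nums.getD (i + 1) 0 then
      (one.set i (nums.getD (i + 1) 0), two.set (i + 1) (nums.getD i 0))
    else pvALoop nums one two (i + 1)
  else (one, two)
termination_by nums.length - 1 - i
decreasing_by omega

def pvValid (arr : List Int) (i : Nat) : Bool :=
  if i < arr.length - 1 then
    if arr.getD i 0 > arr.getD (i + 1) 0 then false
    else pvValid arr (i + 1)
  else true
termination_by arr.length - 1 - i
decreasing_by omega

def checkPossibility3 (nums : List Int) : Bool :=
  let ot := pvALoop nums nums nums 0
  pvValid ot.1 0 || pvValid ot.2 0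

-- ===== PORT B =====
def pvBad (nums : List Int) : List Nat :=
  (List.range (nums.length - 1)).filter (fun i => decide (nums.getD i 0 > nums.getD (i + 1) 0))

def checkPossibility3_alt (nums : List Int) : Bool :=
  match pvBad nums with
  | [] => true
  | [i] =>
      (decide (i = 0) || decide (nums.getD (i - 1) 0 ≤ nums.getD (i + 1) 0))
        || (decide (i = nums.length - 2) || decide (nums.getD i 0 ≤ nums.getD (i + 2) 0))
  | _ => false

-- ===== PRECONDITION & SPEC =====
def Spec_checkPossibility3 (nums : List Int) (out : Bool) : Prop := out = checkPossibility3_alt nums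
instance (nums : List Int) (out : Bool) : Decidable (Spec_checkPossibility3 nums out) := by unfold Spec_checkPossibility3; infer_instance

-- ===== CLAIM (what is proved, stated in full; the proofs are below) =====
def Claim_equal_checkPossibility3 : Prop := ∀ (nums : List Int), Dom_checkPossibility3 nums → Spec_checkPossibility3 nums (checkPossibility3 nums)

-- ===== LEMMAS AND PROOFS =====

theorem getD_set_ne (l : List Int) (i j : Nat) (a : Int) (h : i ≠ j) :
    (l.set i a).getD j 0 = l.getD j 0 := by
  simp [List.getD_eq_getElem?_getD, List.getElem?_set_ne h]

theorem getD_set_self (l : List Int) (i : Nat) (a : Int) (h : i < l.length) :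
    (l.set i a).getD i 0 = a := by
  simp [List.getD_eq_getElem?_getD, h]

theorem booleq (a b : Bool) (h : a = true ↔ b = true) : a = b := by
  cases a <;> cases b <;> simp_all

theorem mem_pvBad (nums : List Int) (k : Nat) :
    k ∈ pvBad nums ↔ k < nums.length - 1 ∧ nums.getD (k + 1) 0 < nums.getD k 0 := by
  simp [pvBad, List.mem_filter, List.mem_range]

theorem pvBad_pairwise (nums : List Int) : (pvBad nums).Pairwise (· < ·) :=
  List.Pairwise.sublist List.filter_sublist List.pairwise_lt_range

theorem pvValid_iff (arr : List Int) (j : Nat) :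
    pvValid arr j = true ↔ ∀ i, j ≤ i → i + 1 < arr.length → arr.getD i 0 ≤ arr.getD (i + 1) 0 := by
  fun_induction pvValid arr j with
  | case1 j hlt hv =>
    simp only [Bool.false_eq_true, false_iff]
    push Not
    exact ⟨j, le_refl j, by omega, by omega⟩
  | case2 j hlt hv ih =>
    rw [ih]
    constructor
    · intro h i hji hin
      rcases Nat.eq_or_lt_of_le hji with rfl | h'
      · omega
      · exact h i h' hin
    · intro h i hji hin
      exact h i (by omega) hin
  | case3 j hlt =>
    simp only [true_iff]
    intro i hji hin
    omega

theorem pvALoop_no_viol (nums one two : List Int) (j : Nat)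
    (h : ∀ k, j ≤ k → k + 1 < nums.length → nums.getD k 0 ≤ nums.getD (k + 1) 0) :
    pvALoop nums one two j = (one, two) := by
  fun_induction pvALoop nums one two j with
  | case1 j hlt hv => exact absurd (h j le_rfl (by omega)) (by omega)
  | case2 j hlt hv ih => exact ih (fun k hk => h k (by omega))
  | case3 j hlt => rfl

theorem pvALoop_first (nums one two : List Int) (j i : Nat)
    (hji : j ≤ i) (hin : i + 1 < nums.length)
    (hv : nums.getD (i + 1) 0 < nums.getD i 0)
    (hmin : ∀ k, j ≤ k → k < i → nums.getD k 0 ≤ nums.getD (k + 1) 0) :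
    pvALoop nums one two j = (one.set i (nums.getD (i + 1) 0), two.set (i + 1) (nums.getD i 0)) := by
  fun_induction pvALoop nums one two j with
  | case1 j hlt hv' =>
    have : j = i := by
      by_contra hne
      exact absurd (hmin j le_rfl (by omega)) (by omega)
    subst this; rfl
  | case2 j hlt hv' ih =>
    exact ih (by rcases Nat.eq_or_lt_of_le hji with rfl | h' <;> omega)
      (fun k hk => hmin k (by omega))
  | case3 j hlt => omega

-- ===== VERDICT (by name: the statement is the Claim_ definition above) =====
theorem checkPossibility3_spec : Claim_equal_checkPossibility3 := by
  intro nums _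
  unfold Spec_checkPossibility3
  show checkPossibility3 nums = checkPossibility3_alt nums
  unfold checkPossibility3 checkPossibility3_alt
  set n := nums.length with hn
  cases hbad : pvBad nums with
  | nil =>
    have hall : ∀ k, 0 ≤ k → k + 1 < n → nums.getD k 0 ≤ nums.getD (k + 1) 0 := by
      intro k _ hk
      by_contra hv
      have : k ∈ pvBad nums := (mem_pvBad nums k).mpr ⟨by omega, by omega⟩
      simp [hbad] at this
    rw [pvALoop_no_viol nums nums nums 0 hall]
    simp [(pvValid_iff nums 0).mpr hall]
  | cons i rest =>
    have hi : i < n - 1 ∧ nums.getD (i + 1) 0 < nums.getD i 0 :=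
      (mem_pvBad nums i).mp (by rw [hbad]; exact List.mem_cons_self)
    have hin : i + 1 < n := by omega
    have hfirst : ∀ k, 0 ≤ k → k < i → nums.getD k 0 ≤ nums.getD (k + 1) 0 := by
      intro k _ hki
      by_contra hv
      have hk : k ∈ pvBad nums := (mem_pvBad nums k).mpr ⟨by omega, by omega⟩
      rw [hbad] at hk
      rcases List.mem_cons.mp hk with rfl | hk
      · omega
      · have := List.rel_of_pairwise_cons (hbad ▸ pvBad_pairwise nums) hk
        omega
    rw [pvALoop_first nums nums nums 0 i (Nat.zero_le i) hin hi.2 hfirst]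
    cases rest with
    | nil =>
      -- exactly one violation, at i
      have huniq : ∀ k, k + 1 < n → k ≠ i → nums.getD k 0 ≤ nums.getD (k + 1) 0 := by
        intro k hk hne
        by_contra hv
        have : k ∈ pvBad nums := (mem_pvBad nums k).mpr ⟨by omega, by omega⟩
        rw [hbad] at this
        simp at this
        exact hne this
      have h1 : pvValid (nums.set i (nums.getD (i + 1) 0)) 0 = true ↔
          (i = 0 ∨ nums.getD (i - 1) 0 ≤ nums.getD (i + 1) 0) := by
        rw [pvValid_iff]
        simp only [List.length_set]
        constructor
        · intro h
          by_cases h0 : i = 0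
          · exact Or.inl h0
          · refine Or.inr ?_
            have := h (i - 1) (Nat.zero_le _) (by omega)
            rwa [getD_set_ne nums i (i - 1) _ (by omega), show i - 1 + 1 = i by omega,
              getD_set_self nums i _ (by omega)] at this
        · intro h k _ hk
          by_cases hki : k = i
          · subst hki
            rw [getD_set_self nums k _ (by omega), getD_set_ne nums k (k + 1) _ (by omega)]
          · by_cases hki1 : k + 1 = i
            · rw [getD_set_ne nums i k _ (by omega), hki1, getD_set_self nums i _ (by omega)]
              rcases h with h0 | hle
              · omega
              · have : k = i - 1 := by omega
                subst this; exact hle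
            · rw [getD_set_ne nums i k _ (by omega), getD_set_ne nums i (k + 1) _ (by omega)]
              exact huniq k hk hki
      have h2 : pvValid (nums.set (i + 1) (nums.getD i 0)) 0 = true ↔
          (i = n - 2 ∨ nums.getD i 0 ≤ nums.getD (i + 2) 0) := by
        rw [pvValid_iff]
        simp only [List.length_set]
        constructor
        · intro h
          by_cases h0 : i = n - 2
          · exact Or.inl h0
          · refine Or.inr ?_
            have := h (i + 1) (Nat.zero_le _) (by omega)
            rwa [getD_set_self nums (i + 1) _ (by omega),
              getD_set_ne nums (i + 1) (i + 1 + 1) _ (by omega),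
              show i + 1 + 1 = i + 2 by omega] at this
        · intro h k _ hk
          by_cases hki : k = i
          · subst hki
            rw [getD_set_ne nums (k + 1) k _ (by omega), getD_set_self nums (k + 1) _ (by omega)]
          · by_cases hki1 : k = i + 1
            · subst hki1
              rw [getD_set_self nums (i + 1) _ (by omega),
                getD_set_ne nums (i + 1) (i + 1 + 1) _ (by omega)]
              rcases h with h0 | hle
              · omega
              · rw [show i + 1 + 1 = i + 2 by omega]
                exact hle
            · rw [getD_set_ne nums (i + 1) k _ (by omega), getD_set_ne nums (i + 1) (k + 1) _ (by omega)]
              exact huniq k hk hki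
      show (pvValid (nums.set i (nums.getD (i + 1) 0)) 0
          || pvValid (nums.set (i + 1) (nums.getD i 0)) 0)
        = ((decide (i = 0) || decide (nums.getD (i - 1) 0 ≤ nums.getD (i + 1) 0))
            || (decide (i = n - 2) || decide (nums.getD i 0 ≤ nums.getD (i + 2) 0)))
      apply booleq
      simp only [Bool.or_eq_true, decide_eq_true_eq]
      rw [h1, h2]
    | cons m rest' =>
      -- at least two violations: i (first) and m > i
      have hm : m < n - 1 ∧ nums.getD (m + 1) 0 < nums.getD m 0 :=
        (mem_pvBad nums m).mp (by rw [hbad]; exact List.mem_cons_of_mem _ List.mem_cons_self)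
      have him : i < m :=
        List.rel_of_pairwise_cons (hbad ▸ pvBad_pairwise nums) List.mem_cons_self
      have e1 : pvValid (nums.set i (nums.getD (i + 1) 0)) 0 = false := by
        by_contra h
        have h' := (pvValid_iff _ 0).mp (Bool.ne_false_iff.mp h) m (Nat.zero_le _)
          (by simp only [List.length_set]; omega)
        rw [getD_set_ne nums i m _ (by omega), getD_set_ne nums i (m + 1) _ (by omega)] at h'
        omega
      have e2 : pvValid (nums.set (i + 1) (nums.getD i 0)) 0 = false := by
        by_contra h
        by_cases hmi : m = i + 1
        · have h' := (pvValid_iff _ 0).mp (Bool.ne_false_iff.mp h) (i + 1) (Nat.zero_le _)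
            (by simp only [List.length_set]; omega)
          rw [getD_set_self nums (i + 1) _ (by omega),
            getD_set_ne nums (i + 1) (i + 1 + 1) _ (by omega)] at h'
          subst hmi
          omega
        · have h' := (pvValid_iff _ 0).mp (Bool.ne_false_iff.mp h) m (Nat.zero_le _)
            (by simp only [List.length_set]; omega)
          rw [getD_set_ne nums (i + 1) m _ (by omega), getD_set_ne nums (i + 1) (m + 1) _ (by omega)] at h'
          omega
      show (pvValid (nums.set i (nums.getD (i + 1) 0)) 0
          || pvValid (nums.set (i + 1) (nums.getD i 0)) 0) = false
      rw [e1, e2]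
      rfl
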